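-- pv_equiv track=rewrite | github.com/RamgopalBhadu/Python-with-DS-and-Algo | Stacks/check_redundant_brackets.py | checkRedundant
-- ===== SOURCE A (Python) =====
-- def checkRedundant(str):
-- #### Implement Your Code Here
--     # create a stack of characters
--     st = []
--
--     # Iterate through the given expression
--     for ch in str:
--
--         # if current character is close
--         # parenthesis ')'
--         if (ch == ')'):
--             top = st[-1]
--             st.pop()
--
--             # If immediate pop have open parenthesis
--             # '(' duplicate brackets found
--             flag = True
--
--             while (top != '('):
--
--                 # Check for operators in expression
--                 if (top == '+' or top == '-' or
--                     top == '*' or top == '/'):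
--                     flag = False
--
--                 # Fetch top element of stack
--                 top = st[-1]
--                 st.pop()
--
--             # If operators not found
--             if (flag == True):
--                 return True
--
--         else:
--             st.append(ch) # append open parenthesis '(',
--                           # operators and operands to stack
--     return False
-- ===== SOURCE B (Python) =====
-- def checkRedundant(str):
--     # Per-open-bracket 'has operator' flag stack instead of a character stack.
--     flags = []
--     for ch in str:
--         if ch == '(':
--             flags.append(False)
--         elif ch in '+-*/':
--             if flags:
--                 flags[-1] = True
--         elif ch == ')':
--             if not flags.pop():
--                 return True
--     return False
-- ===== Notes on version B (the rewrite author's own statement) =====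
-- stated objective: simpler
-- what changed: Replaces the character stack and inner popping while-loop of A with a stack of per-open-bracket booleans recording whether an operator was seen inside the bracket, so each closing bracket is a single pop instead of a scan.
-- outside the precondition, e.g. on checkRedundant('())'): A returns True, B returns True
import Mathlib
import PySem

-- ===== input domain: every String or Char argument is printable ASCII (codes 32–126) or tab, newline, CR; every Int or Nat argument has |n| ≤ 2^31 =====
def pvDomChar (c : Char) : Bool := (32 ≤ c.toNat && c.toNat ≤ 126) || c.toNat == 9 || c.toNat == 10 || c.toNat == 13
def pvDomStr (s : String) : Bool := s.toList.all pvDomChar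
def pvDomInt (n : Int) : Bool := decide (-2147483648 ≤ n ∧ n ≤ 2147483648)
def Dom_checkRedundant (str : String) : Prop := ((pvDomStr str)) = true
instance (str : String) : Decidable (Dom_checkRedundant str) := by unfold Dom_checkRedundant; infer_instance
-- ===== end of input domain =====

-- B replaces A's character stack and inner popping while-loop with one boolean
-- has-operator flag per currently open bracket (simpler).


-- ===== PORT A =====
-- A's inner while-loop: pop until '(' (flag := false once an operator is seen).
-- Stack is head-first (head = Python st[-1]); 'none' = IndexError on underflow.
def checkRedundantInner : List Char → Bool → Option (Bool × List Char)
  | [], _ => none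
  | top :: rest, flag =>
      if top = '(' then some (flag, rest)
      else checkRedundantInner rest
        (if top = '+' ∨ top = '-' ∨ top = '*' ∨ top = '/' then false else flag)

-- A's main for-loop over the characters, carrying the character stack.
def checkRedundantGo : List Char → List Char → Bool
  | [], _ => false
  | ch :: cs, st =>
      if ch = ')' then
        match checkRedundantInner st true with
        | none => false          -- Python raises IndexError here (outside Pre_)
        | some (flag, st') => if flag then true else checkRedundantGo cs st'
      else checkRedundantGo cs (ch :: st)

def checkRedundant (str : String) : Bool := checkRedundantGo str.toList []

-- ===== PORT B =====
-- B's loop: flags is head-first (head = Python flags[-1]).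
def checkRedundantAltGo : List Char → List Bool → Bool
  | [], _ => false
  | ch :: cs, flags =>
      if ch = '(' then checkRedundantAltGo cs (false :: flags)
      else if ch = '+' ∨ ch = '-' ∨ ch = '*' ∨ ch = '/' then
        match flags with
        | [] => checkRedundantAltGo cs []
        | _ :: rest => checkRedundantAltGo cs (true :: rest)
      else if ch = ')' then
        match flags with
        | [] => false            -- Python raises IndexError here (outside Pre_)
        | f :: rest => if !f then true else checkRedundantAltGo cs rest
      else checkRedundantAltGo cs flags

def checkRedundant_alt (str : String) : Bool := checkRedundantAltGo str.toList []

-- ===== PRECONDITION & SPEC =====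
-- Pre_ excludes strings with a ')' not matched by a preceding '(': there A's
-- stack underflows with IndexError — unless an earlier operator-free bracket
-- pair already returned True (e.g. "())"), a case Pre_ also excludes although
-- both programs return the same value on it.
def Pre_checkRedundant (str : String) : Prop :=
  ∀ n ∈ List.range (str.toList.length + 1),
    (str.toList.take n).count ')' ≤ (str.toList.take n).count '('
instance (str : String) : Decidable (Pre_checkRedundant str) := by
  unfold Pre_checkRedundant; infer_instance
def pvWitness_checkRedundant : String := "(a+b)*(c)"
def Spec_checkRedundant (str : String) (out : Bool) : Prop := out = checkRedundant_alt str
instance (str : String) (out : Bool) : Decidable (Spec_checkRedundant str out) := by unfold Spec_checkRedundant; infer_instance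

-- ===== CLAIM (what is proved, stated in full; the proofs are below) =====
def Claim_equal_checkRedundant : Prop := ∀ (str : String), Dom_checkRedundant str → Pre_checkRedundant str → Spec_checkRedundant str (checkRedundant str)

-- ===== LEMMAS AND PROOFS =====

def pvIsOp (c : Char) : Bool := c == '+' || c == '-' || c == '*' || c == '/'

-- Invariant relating A's character stack to B's flag stack.
inductive pvRel : List Char → List Bool → Prop
  | base (seg : List Char) : '(' ∉ seg → pvRel seg []
  | cons (seg : List Char) (st : List Char) (flags : List Bool) :
      '(' ∉ seg → pvRel st flags →
      pvRel (seg ++ '(' :: st) ((seg.any pvIsOp) :: flags)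

-- Balance of the remaining characters relative to k pending open brackets.
def pvBal (cs : List Char) (k : Nat) : Prop :=
  ∀ n, (cs.take n).count ')' ≤ k + (cs.take n).count '('

theorem pvBal_cons {ch : Char} {cs : List Char} {k : Nat} (h : pvBal (ch :: cs) k) :
    (ch = '(' → pvBal cs (k + 1)) ∧
    (ch = ')' → 1 ≤ k ∧ pvBal cs (k - 1)) ∧
    (ch ≠ '(' → ch ≠ ')' → pvBal cs k) := by
  have h1 := h 1
  refine ⟨?_, ?_, ?_⟩
  · intro e n
    have := h (n + 1)
    simp [List.take_succ_cons, e] at this ⊢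
    omega
  · intro e
    constructor
    · simp [List.take_succ_cons, e] at h1; omega
    · intro n
      have := h (n + 1)
      simp [List.take_succ_cons, e] at this ⊢
      omega
  · intro e1 e2 n
    have := h (n + 1)
    simp [List.take_succ_cons, e1, e2] at this ⊢
    omega

theorem pvInner_seg (seg : List Char) (st : List Char) (flag : Bool)
    (hseg : '(' ∉ seg) :
    checkRedundantInner (seg ++ '(' :: st) flag =
      some (flag && !(seg.any pvIsOp), st) := by
  induction seg generalizing flag with
  | nil => simp [checkRedundantInner]
  | cons c cs ih =>
      have hc : c ≠ '(' := by simp at hseg; tauto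
      have hcs : '(' ∉ cs := by simp at hseg; tauto
      rw [List.cons_append, checkRedundantInner]
      simp only [if_neg hc]
      rw [ih _ hcs]
      by_cases hop : pvIsOp c = true
      · have h2 : (c = '+' ∨ c = '-' ∨ c = '*' ∨ c = '/') := by
          simp [pvIsOp] at hop; tauto
        simp [h2, List.any_cons, hop]
      · have h2 : ¬(c = '+' ∨ c = '-' ∨ c = '*' ∨ c = '/') := by
          simp [pvIsOp] at hop; tauto
        simp only [if_neg h2]
        have hf : pvIsOp c = false := by revert hop; cases pvIsOp c <;> simp
        simp [List.any_cons, hf]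

theorem pvMain (cs : List Char) (st : List Char) (flags : List Bool)
    (hrel : pvRel st flags) (hbal : pvBal cs flags.length) :
    checkRedundantGo cs st = checkRedundantAltGo cs flags := by
  induction cs generalizing st flags with
  | nil => simp [checkRedundantGo, checkRedundantAltGo]
  | cons ch cs ih =>
      obtain ⟨hb1, hb2, hb3⟩ := pvBal_cons hbal
      by_cases hpar : ch = '('
      · subst hpar
        simp only [checkRedundantGo, checkRedundantAltGo]
        simp only [if_neg (by decide : ¬('(' = ')'))]
        have hrel' : pvRel ('(' :: st) (false :: flags) := by
          have := pvRel.cons [] st flags (by simp) hrel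
          simpa using this
        exact ih _ _ hrel' (by simpa using hb1 rfl)
      · by_cases hcl : ch = ')'
        · subst hcl
          obtain ⟨hk, hbal'⟩ := hb2 rfl
          cases hrel with
          | base seg h => simp at hk
          | cons seg st' flags' hseg hrel' =>
              simp only [checkRedundantGo, checkRedundantAltGo]
              rw [pvInner_seg seg st' true hseg]
              by_cases hf : seg.any pvIsOp = true
              · simp [hf]
                exact ih _ _ hrel' (by simpa using hbal')
              · simp only [Bool.not_eq_true] at hf
                simp [hf]
        · -- ch is neither '(' nor ')'
          simp only [checkRedundantGo, checkRedundantAltGo]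
          simp only [if_neg hcl, if_neg hpar]
          have hbal' := hb3 hpar hcl
          by_cases hop : ch = '+' ∨ ch = '-' ∨ ch = '*' ∨ ch = '/'
          · simp only [if_pos hop]
            cases hrel with
            | base seg h =>
                have : pvRel (ch :: st) [] :=
                  pvRel.base _ (by
                    simp only [List.mem_cons, not_or]
                    exact ⟨fun e => hpar e.symm, h⟩)
                exact ih _ _ this hbal'
            | cons seg st' flags' hseg hrel' =>
                have hchop : pvIsOp ch = true := by
                  simp [pvIsOp]; tauto
                have : pvRel (ch :: (seg ++ '(' :: st')) (true :: flags') := by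
                  have := pvRel.cons (ch :: seg) st' flags'
                    (by simp only [List.mem_cons, not_or]
                        exact ⟨fun e => hpar e.symm, hseg⟩) hrel'
                  simpa [List.any_cons, hchop] using this
                exact ih _ _ this (by simpa using hbal')
          · simp only [if_neg hop]
            have hchop : pvIsOp ch = false := by
              simp [pvIsOp]; tauto
            cases hrel with
            | base seg h =>
                have : pvRel (ch :: st) [] :=
                  pvRel.base _ (by
                    simp only [List.mem_cons, not_or]
                    exact ⟨fun e => hpar e.symm, h⟩)
                exact ih _ _ this hbal'
            | cons seg st' flags' hseg hrel' =>
                have : pvRel (ch :: (seg ++ '(' :: st'))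
                    ((seg.any pvIsOp) :: flags') := by
                  have := pvRel.cons (ch :: seg) st' flags'
                    (by simp only [List.mem_cons, not_or]
                        exact ⟨fun e => hpar e.symm, hseg⟩) hrel'
                  simpa [List.any_cons, hchop] using this
                exact ih _ _ this hbal'

-- ===== VERDICT (by name: the statement is the Claim_ definition above) =====
theorem checkRedundant_spec : Claim_equal_checkRedundant := by
  intro str _ hpre
  unfold Spec_checkRedundant checkRedundant checkRedundant_alt
  apply pvMain _ _ _ (pvRel.base [] (by simp))
  intro n
  have h1 : (str.toList.take n).count ')' ≤ (str.toList.take n).count '(' := by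
    by_cases hn : n ≤ str.toList.length
    · exact hpre n (List.mem_range.mpr (by omega))
    · have h2 := hpre str.toList.length (List.mem_range.mpr (by omega))
      rw [List.take_of_length_le (by omega)]
      rwa [List.take_length] at h2
  simpa using h1
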